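-- pv_equiv track=rewrite | github.com/ITSupportTechsur/attendance-tracker | weekly_report.py | _name_key
-- ===== SOURCE A (Python) =====
-- def _name_key(name: str) -> str:
--     tokens  = str(name).strip().lower().split()
--     filtered = [t for t in tokens if len(t) > 1 and not t.isdigit()]
--     deduped  = [filtered[i] for i in range(len(filtered))
--                 if i == 0 or filtered[i] != filtered[i - 1]]
--     if len(deduped) >= 2:
--         return deduped[0] + " " + deduped[-1]
--     return " ".join(deduped) if deduped else name.strip().lower()
-- ===== SOURCE B (Python) =====
-- def _name_key(name: str) -> str:
--     # The adjacent-dedup in A never changes the first/last value and only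
--     # collapses an all-equal list to a singleton, so B skips the dedup:
--     # keep the filtered endpoints, and test constancy instead.
--     s = str(name).strip().lower()
--     kept = [t for t in s.split() if len(t) > 1 and not t.isdigit()]
--     if not kept:
--         return s
--     if any(t != kept[0] for t in kept):
--         return kept[0] + " " + kept[-1]
--     return kept[0]
-- ===== Notes on version B (the rewrite author's own statement) =====
-- stated objective: simpler
-- what changed: B eliminates A's adjacent-dedup pass: dedup preserves the first and last values and produces at least two elements exactly when the filtered token list is non-constant, so B just compares each filtered token with the first and picks the endpoints (falling back to the normalized whole name when no token survives).
import Mathlib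
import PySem

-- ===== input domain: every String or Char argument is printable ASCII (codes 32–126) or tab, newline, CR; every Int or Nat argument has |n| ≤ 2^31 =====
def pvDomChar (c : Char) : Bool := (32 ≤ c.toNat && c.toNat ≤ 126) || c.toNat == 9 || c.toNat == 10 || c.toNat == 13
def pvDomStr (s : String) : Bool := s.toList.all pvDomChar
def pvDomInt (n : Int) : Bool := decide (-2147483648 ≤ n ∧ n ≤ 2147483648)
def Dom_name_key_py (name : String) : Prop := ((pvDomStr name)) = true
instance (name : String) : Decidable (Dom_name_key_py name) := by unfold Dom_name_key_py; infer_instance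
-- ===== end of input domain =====

-- B drops A's adjacent-dedup pass: dedup keeps the first/last values and yields ≥2 elements
-- exactly when the filtered list is non-constant, so B only tests constancy; objective: simpler.

-- ===== PORT A =====
def name_key_py (name : String) : String :=
  let tokens := PySem.Str.split₀ (PySem.Str.lower (PySem.Str.strip name))
  let filtered := tokens.filter (fun t => decide (1 < PySem.Str.len t) && !PySem.Str.strIsdigit t)
  let deduped := (List.range filtered.length).foldl
    (fun acc i =>
      if i == 0 || (filtered.getD i "" != filtered.getD (i - 1) "") then acc ++ [filtered.getD i ""]
      else acc) []
  if 2 ≤ deduped.length then deduped.headD "" ++ " " ++ deduped.getLastD ""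
  else if !deduped.isEmpty then PySem.Str.join " " deduped
  else PySem.Str.lower (PySem.Str.strip name)

-- ===== PORT B =====
def name_key_py_alt (name : String) : String :=
  let s := PySem.Str.lower (PySem.Str.strip name)
  let kept := (PySem.Str.split₀ s).filter (fun t => decide (1 < PySem.Str.len t) && !PySem.Str.strIsdigit t)
  if kept.isEmpty then s
  else if kept.any (fun t => t != kept.headD "") then kept.headD "" ++ " " ++ kept.getLastD ""
  else kept.headD ""

-- ===== PRECONDITION & SPEC =====
def Spec_name_key_py (name : String) (out : String) : Prop := out = name_key_py_alt name
instance (name : String) (out : String) : Decidable (Spec_name_key_py name out) := by unfold Spec_name_key_py; infer_instance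

-- ===== CLAIM (what is proved, stated in full; the proofs are below) =====
def Claim_equal_name_key_py : Prop := ∀ (name : String), Dom_name_key_py name → Spec_name_key_py name (name_key_py name)

-- ===== LEMMAS AND PROOFS =====

-- the token filter shared by both programs
def pvP (t : String) : Bool := decide (1 < PySem.Str.len t) && !PySem.Str.strIsdigit t

-- adjacent dedup of a list, continuing after a previously kept token `prev`
def pvDdFrom : String → List String → List String
  | _, [] => []
  | prev, x :: xs => if x != prev then x :: pvDdFrom x xs else pvDdFrom prev xs

def pvStepA (f : List String) (acc : List String) (i : Nat) : List String :=
  if i == 0 || (f.getD i "" != f.getD (i - 1) "") then acc ++ [f.getD i ""] else acc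

def pvStripped (name : String) : String := PySem.Str.lower (PySem.Str.strip name)

def pvFiltered (name : String) : List String := (PySem.Str.split₀ (pvStripped name)).filter pvP

def pvOutA (f : List String) (fallback : String) : String :=
  let deduped := (List.range f.length).foldl (pvStepA f) []
  if 2 ≤ deduped.length then deduped.headD "" ++ " " ++ deduped.getLastD ""
  else if !deduped.isEmpty then PySem.Str.join " " deduped
  else fallback

def pvOutB (f : List String) (fallback : String) : String :=
  if f.isEmpty then fallback
  else if f.any (fun t => t != f.headD "") then f.headD "" ++ " " ++ f.getLastD ""
  else f.headD ""

lemma pvRangeFold (l : List String) : ∀ (f : List String) (k : Nat) (prev : String) (acc : List String),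
    1 ≤ k → f.drop k = l → f.getD (k - 1) "" = prev →
    (List.range' k l.length).foldl (pvStepA f) acc = acc ++ pvDdFrom prev l := by
  induction l with
  | nil => intro f k prev acc hk hd hp; simp [pvDdFrom]
  | cons x xs ih =>
    intro f k prev acc hk hd hp
    have hget : f.getD k "" = x := by
      have h0 : f[k]? = some x := by
        rw [show k = k + 0 by omega, ← List.getElem?_drop, hd]; rfl
      simp [List.getD_eq_getElem?_getD, h0]
    have hd' : f.drop (k + 1) = xs := by
      have : f.drop (k + 1) = (f.drop k).drop 1 := by rw [List.drop_drop]
      simp [this, hd]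
    have hk0 : (k == 0) = false := by simp; omega
    have hstep : pvStepA f acc k = if x != prev then acc ++ [x] else acc := by
      unfold pvStepA; rw [hk0, hget, hp]; simp
    rw [List.length_cons, List.range'_succ, List.foldl_cons, hstep]
    by_cases hxp : (x != prev) = true
    · rw [if_pos hxp, ih f (k + 1) x (acc ++ [x]) (by omega) hd' (by simpa using hget)]
      simp [pvDdFrom, hxp]
    · have hxp' : (x != prev) = false := by revert hxp; cases (x != prev) <;> simp
      have hx : x = prev := by simpa using hxp'
      rw [if_neg hxp, ih f (k + 1) x acc (by omega) hd' (by simpa using hget)]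
      simp [pvDdFrom, hx]

lemma pvDedup_cons (y : String) (r : List String) :
    (List.range (y :: r).length).foldl (pvStepA (y :: r)) [] = y :: pvDdFrom y r := by
  rw [List.range_eq_range', List.length_cons, List.range'_succ, List.foldl_cons]
  have hstep0 : pvStepA (y :: r) [] 0 = [y] := by unfold pvStepA; simp
  rw [hstep0, pvRangeFold r (y :: r) 1 y [y] (by omega) (by simp) (by simp)]
  simp

-- dedup is empty exactly when every element equals the previous kept token
lemma pvDd_empty_iff (l : List String) : ∀ (prev : String),
    (pvDdFrom prev l = [] ↔ l.all (fun t => t == prev) = true) := by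
  induction l with
  | nil => intro prev; simp [pvDdFrom]
  | cons x xs ih =>
    intro prev
    by_cases hx : (x != prev) = true
    · have hxne : x ≠ prev := by simpa using hx
      simp [pvDdFrom, hx, hxne]
    · have hx' : (x != prev) = false := by revert hx; cases (x != prev) <;> simp
      have hxe : x = prev := by simpa using hx'
      simp [pvDdFrom, hxe, ih]

-- dedup preserves the last value
lemma pvDd_last (l : List String) : ∀ (prev : String),
    (pvDdFrom prev l).getLastD prev = l.getLastD prev := by
  induction l with
  | nil => intro prev; simp [pvDdFrom]
  | cons x xs ih =>
    intro prev
    by_cases hx : (x != prev) = true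
    · show (if (x != prev) = true then x :: pvDdFrom x xs else pvDdFrom prev xs).getLastD prev
        = (x :: xs).getLastD prev
      rw [if_pos hx, List.getLastD_cons, List.getLastD_cons]
      exact ih x
    · have hxe : x = prev := by simpa using hx
      show (if (x != prev) = true then x :: pvDdFrom x xs else pvDdFrom prev xs).getLastD prev
        = (x :: xs).getLastD prev
      rw [if_neg hx, List.getLastD_cons, hxe]
      exact ih prev

lemma pvOut_eq (f : List String) (s : String) : pvOutA f s = pvOutB f s := by
  cases f with
  | nil => simp [pvOutA, pvOutB]
  | cons y r =>
    unfold pvOutA pvOutB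
    rw [pvDedup_cons]
    have hany : ((y :: r).any (fun t => t != (y :: r).headD "")) = r.any (fun t => t != y) := by
      simp
    cases hdd : pvDdFrom y r with
    | nil =>
      have hall : r.all (fun t => t == y) = true := (pvDd_empty_iff r y).mp hdd
      have hanyf : r.any (fun t => t != y) = false := by
        rw [← Bool.not_eq_true]
        simp only [List.any_eq_true, bne_iff_ne]
        intro ⟨t, ht, hne⟩
        exact hne (by simpa using List.all_eq_true.mp hall t ht)
      simp [hanyf, PySem.Str.join, PySem.Chars.join_singleton]
    | cons d ds =>
      have hne : pvDdFrom y r ≠ [] := by rw [hdd]; simp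
      have hanyt : r.any (fun t => t != y) = true := by
        by_contra hno
        have hall : r.all (fun t => t == y) = true := by
          simp only [List.all_eq_true, beq_iff_eq]
          intro t ht
          by_contra hne2
          exact hno (List.any_eq_true.mpr ⟨t, ht, by simpa using hne2⟩)
        exact hne ((pvDd_empty_iff r y).mpr hall)
      have hlast : (y :: d :: ds).getLastD "" = (y :: r).getLastD "" :=
        calc (y :: d :: ds).getLastD "" = (d :: ds).getLastD y := List.getLastD_cons
          _ = r.getLastD y := by rw [← hdd]; exact pvDd_last r y
          _ = (y :: r).getLastD "" := List.getLastD_cons.symm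
      have h2 : 2 ≤ (y :: d :: ds).length := by simp
      simp only [List.isEmpty_cons, hany, hanyt, if_pos h2, Bool.false_eq_true,
        if_false, if_true]
      simp only [List.headD_cons] at hlast ⊢
      rw [hlast]

-- ===== VERDICT (by name: the statement is the Claim_ definition above) =====
theorem name_key_py_spec : Claim_equal_name_key_py := by
  intro name _
  show name_key_py name = name_key_py_alt name
  have hA : name_key_py name = pvOutA (pvFiltered name) (pvStripped name) := by
    unfold name_key_py pvOutA pvFiltered pvStripped pvStepA pvP; rfl
  have hB : name_key_py_alt name = pvOutB (pvFiltered name) (pvStripped name) := by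
    unfold name_key_py_alt pvOutB pvFiltered pvStripped pvP; rfl
  rw [hA, hB, pvOut_eq]
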